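-- pv_equiv track=rewrite | github.com/duochen/Python-Beginner | LearnToCodeBySolvingProblems/ch9/cco96p2.py | guess_consistent
-- ===== SOURCE A (Python) =====
-- def guess_consistent(number, code, correct, misplaced):
--     """
--     number is a string of four digits.
--     code is the four-digit code of the guess.
--     correct is the number of correct digits in the guess.
--     misplaced is the number of misplaced digits in the guess.
--
--     Return True if number is consistent with the guess, False otherwise.
--     """
--     number = list(number)
--     code = list(code)
--     num_correct = 0
--     num_misplaced = 0
--
--     # Determine number of correct digits
--     for i in range(len(number)):
--         if number[i] == code[i]:
--             num_correct = num_correct + 1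
--             number[i] = ''
--             code[i] = ''
--
--     # Determine number of misplaced digits
--     for i in range(len(number)):
--         if number[i] != '' and number[i] in code:
--             where = code.index(number[i])
--             code[where] = ''
--             num_misplaced = num_misplaced + 1
--
--     return correct == num_correct and misplaced == num_misplaced
-- ===== SOURCE B (Python) =====
-- def guess_consistent(number, code, correct, misplaced):
--     # Positional matches; indexing code[i] keeps IndexError when code is shorter.
--     num_correct = sum(1 for i in range(len(number)) if number[i] == code[i])
--     # Multiset intersection size via a frequency table of number's digits.
--     cnt = {}
--     for ch in number:
--         cnt[ch] = cnt.get(ch, 0) + 1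
--     total = 0
--     for ch in code:
--         if cnt.get(ch, 0) > 0:
--             cnt[ch] = cnt[ch] - 1
--             total += 1
--     # Mastermind identity: misplaced = multiset-intersection - correct.
--     return correct == num_correct and misplaced == total - num_correct
-- ===== Notes on version B (the rewrite author's own statement) =====
-- stated objective: faster
-- what changed: Replaces A's in-place sentinel-masking ('' writes) and greedy inner code.index scans by one positional pass plus a frequency table: misplaced is derived from the multiset-intersection size via the Mastermind identity total - correct.
import Mathlib
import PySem

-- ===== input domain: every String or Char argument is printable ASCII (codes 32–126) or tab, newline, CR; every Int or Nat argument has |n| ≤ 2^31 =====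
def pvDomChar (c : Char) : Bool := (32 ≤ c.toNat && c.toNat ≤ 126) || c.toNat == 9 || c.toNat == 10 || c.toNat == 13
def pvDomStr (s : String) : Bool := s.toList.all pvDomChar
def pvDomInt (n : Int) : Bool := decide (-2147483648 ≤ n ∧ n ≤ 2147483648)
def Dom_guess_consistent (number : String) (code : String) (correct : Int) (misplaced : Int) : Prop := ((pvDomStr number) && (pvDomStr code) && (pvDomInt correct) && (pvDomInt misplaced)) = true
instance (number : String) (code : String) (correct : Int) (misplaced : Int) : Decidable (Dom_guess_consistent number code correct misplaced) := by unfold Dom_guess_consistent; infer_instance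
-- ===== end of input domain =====

-- B replaces A's sentinel-masking and greedy code.index removal by a positional pass plus a
-- frequency table (multiset intersection) and the identity misplaced = total - correct;
-- return-value equivalence only (A mutates only its local lists, so callers see no difference).

-- ===== PORT A =====
-- Python's '' sentinel written into the char lists is modelled exactly by `none`
-- (list elements are one-char strings or ''; Option Char is that set).
-- First loop: for i in range(len(number)): compare number[i]/code[i], blank both on a match.
-- The (_ :: _, []) case is Python's IndexError (excluded by Pre_); value there is irrelevant.
def pvA_loop1 : List Char → List Char → List (Option Char) × List (Option Char) × Int
  | [], c => ([], c.map some, 0)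
  | _ :: _, [] => ([], [], 0)
  | a :: n, b :: c =>
    let r := pvA_loop1 n c
    if a = b then (none :: r.1, none :: r.2.1, r.2.2 + 1)
    else (some a :: r.1, some b :: r.2.1, r.2.2)

-- Second loop: for each remaining number digit, find it in code (membership test +
-- code.index are the one search, PySem.List.index?), blank it, count a misplacement.
def pvA_loop2 : List (Option Char) → List (Option Char) → Int → Int
  | [], _, m => m
  | none :: n, c, m => pvA_loop2 n c m
  | some a :: n, c, m =>
    match PySem.List.index? c (some a) with
    | none => pvA_loop2 n c m
    | some w => pvA_loop2 n (c.set w none) (m + 1)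

def guess_consistent (number : String) (code : String) (correct : Int) (misplaced : Int) : Bool :=
  let r := pvA_loop1 number.toList code.toList
  let m := pvA_loop2 r.1 r.2.1 0
  correct == r.2.2 && misplaced == m

-- ===== PORT B =====
-- num_correct = sum(1 for i in range(len(number)) if number[i] == code[i]);
-- the (_ :: _, []) case is Python's IndexError (excluded by Pre_).
def pvB_correct : List Char → List Char → Int
  | [], _ => 0
  | _ :: _, [] => 0
  | a :: n, b :: c => (if a = b then 1 else 0) + pvB_correct n c

-- for ch in code: consume one occurrence from the frequency table if available.
def pvB_total : List Char → PySem.Dict Char Int → Int → Int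
  | [], _, t => t
  | ch :: c, d, t =>
    if d.getD ch 0 > 0 then pvB_total c (d.insert ch (d.getD ch 0 - 1)) (t + 1)
    else pvB_total c d t

def guess_consistent_alt (number : String) (code : String) (correct : Int) (misplaced : Int) : Bool :=
  let k := pvB_correct number.toList code.toList
  let cnt := number.toList.foldl (fun d ch => d.insert ch (d.getD ch 0 + 1)) PySem.Dict.empty
  let t := pvB_total code.toList cnt 0
  correct == k && misplaced == (t - k)

-- ===== PRECONDITION & SPEC =====
-- A indexes code[i] for every i < len(number): it raises IndexError (and B raises the
-- same way) exactly when number is longer than code; those inputs are excluded.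
def Pre_guess_consistent (number : String) (code : String) (correct : Int) (misplaced : Int) : Prop :=
  number.toList.length ≤ code.toList.length
instance (number : String) (code : String) (correct : Int) (misplaced : Int) : Decidable (Pre_guess_consistent number code correct misplaced) := by unfold Pre_guess_consistent; infer_instance

def pvWitness_guess_consistent : String × String × Int × Int := ("1234", "1243", 2, 2)

def Spec_guess_consistent (number : String) (code : String) (correct : Int) (misplaced : Int) (out : Bool) : Prop := out = guess_consistent_alt number code correct misplaced
instance (number : String) (code : String) (correct : Int) (misplaced : Int) (out : Bool) : Decidable (Spec_guess_consistent number code correct misplaced out) := by unfold Spec_guess_consistent; infer_instance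

-- ===== CLAIM (what is proved, stated in full; the proofs are below) =====
def Claim_equal_guess_consistent : Prop := ∀ (number : String) (code : String) (correct : Int) (misplaced : Int), Dom_guess_consistent number code correct misplaced → Pre_guess_consistent number code correct misplaced → Spec_guess_consistent number code correct misplaced (guess_consistent number code correct misplaced)

-- ===== LEMMAS AND PROOFS =====

-- the multiset of characters still present in a sentinel-masked list
def pvRem (l : List (Option Char)) : Multiset Char := (l.filterMap id : List Char)

theorem pvRem_none (l : List (Option Char)) : pvRem (none :: l) = pvRem l := rfl
theorem pvRem_some (a : Char) (l : List (Option Char)) : pvRem (some a :: l) = a ::ₘ pvRem l := rfl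

theorem pvMem_rem (a : Char) (l : List (Option Char)) : a ∈ pvRem l ↔ some a ∈ l := by
  simp [pvRem, List.mem_filterMap]

-- loop1 splits number and code into the matched multiset m and the two remainders
theorem pvA_loop1_decomp (n c : List Char) (h : n.length ≤ c.length) :
    ∃ m : Multiset Char,
      (n : Multiset Char) = pvRem (pvA_loop1 n c).1 + m ∧
      (c : Multiset Char) = pvRem (pvA_loop1 n c).2.1 + m ∧
      (pvA_loop1 n c).2.2 = (m.card : Int) := by
  induction n generalizing c with
  | nil =>
    refine ⟨0, by simp [pvA_loop1, pvRem], ?_, by simp [pvA_loop1]⟩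
    simp [pvA_loop1, pvRem, List.filterMap_map]
  | cons a n ih =>
    cases c with
    | nil => simp at h
    | cons b cs =>
      obtain ⟨m, hn, hc, hk⟩ := ih cs (by simpa using h)
      have hred : pvA_loop1 (a :: n) (b :: cs)
          = if a = b then (none :: (pvA_loop1 n cs).1, none :: (pvA_loop1 n cs).2.1, (pvA_loop1 n cs).2.2 + 1)
            else (some a :: (pvA_loop1 n cs).1, some b :: (pvA_loop1 n cs).2.1, (pvA_loop1 n cs).2.2) := rfl
      by_cases hab : a = b
      · refine ⟨a ::ₘ m, ?_, ?_, ?_⟩ <;> simp only [hred, if_pos hab]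
        · rw [pvRem_none, ← Multiset.cons_coe, hn, Multiset.add_cons]
        · rw [pvRem_none, ← Multiset.cons_coe, hc, Multiset.add_cons, hab]
        · rw [hk, Multiset.card_cons]; push_cast; ring
      · refine ⟨m, ?_, ?_, ?_⟩ <;> simp only [hred, if_neg hab]
        · rw [pvRem_some, ← Multiset.cons_coe, hn, Multiset.cons_add]
        · rw [pvRem_some, ← Multiset.cons_coe, hc, Multiset.cons_add]
        · exact hk

-- blanking the first occurrence of `some a` removes one `a` from the remainder
theorem pvRem_set_index (c : List (Option Char)) (a : Char) (w : Nat)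
    (h : PySem.List.index? c (some a) = some w) :
    pvRem (c.set w none) = (pvRem c).erase a := by
  obtain ⟨pre, suf, rfl, rfl, hnot⟩ := (PySem.List.index?_eq_some_iff c (some a) w).1 h
  have hset : (pre ++ some a :: suf).set pre.length none = pre ++ none :: suf := by simp
  have hna : a ∉ pre.filterMap id := by
    simp only [List.mem_filterMap]
    rintro ⟨o, ho, rfl⟩; exact hnot ho
  simp only [pvRem, hset, List.filterMap_append, List.filterMap_cons]
  simp only [id]
  show ((pre.filterMap id ++ suf.filterMap id : List Char) : Multiset Char)
      = (((pre.filterMap id ++ a :: suf.filterMap id : List Char) : Multiset Char)).erase a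
  rw [Multiset.coe_erase, List.erase_append_right _ hna, List.erase_cons_head]

-- A's second loop computes the multiset-intersection size of the remainders
theorem pvA_loop2_eq (n : List (Option Char)) (c : List (Option Char)) (m0 : Int) :
    pvA_loop2 n c m0 = m0 + ((pvRem n ∩ pvRem c).card : Int) := by
  induction n generalizing c m0 with
  | nil => simp [pvA_loop2, pvRem]
  | cons o n ih =>
    cases o with
    | none => rw [pvA_loop2, ih, pvRem_none]
    | some a =>
      rcases hidx : PySem.List.index? c (some a) with _ | w
      · have hmem : a ∉ pvRem c := by
          rw [pvMem_rem]
          exact (PySem.List.index?_eq_none_iff c (some a)).1 hidx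
        simp only [pvA_loop2, hidx]
        rw [ih, pvRem_some, Multiset.cons_inter_of_neg _ hmem]
      · have hmem : a ∈ pvRem c := by
          rw [pvMem_rem]
          exact (PySem.List.index?_isSome_iff c (some a)).1 (by rw [hidx]; rfl)
        simp only [pvA_loop2, hidx]
        rw [ih, pvRem_some, pvRem_set_index c a w hidx,
          Multiset.cons_inter_of_pos _ hmem]
        simp only [Multiset.card_cons]
        push_cast; ring

-- B's positional count equals A's first-loop count
theorem pvB_correct_eq (n c : List Char) : pvB_correct n c = (pvA_loop1 n c).2.2 := by
  induction n generalizing c with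
  | nil => cases c <;> simp [pvB_correct, pvA_loop1]
  | cons a n ih =>
    cases c with
    | nil => simp [pvB_correct, pvA_loop1]
    | cons b cs =>
      by_cases hab : a = b <;>
        simp [pvB_correct, pvA_loop1, hab, ih]; ring

-- B's consuming fold computes the multiset-intersection size
theorem pvB_total_eq (c : List Char) (M : Multiset Char) (d : PySem.Dict Char Int) (t : Int)
    (hd : ∀ ch, d.getD ch 0 = (M.count ch : Int)) :
    pvB_total c d t = t + ((↑c ∩ M : Multiset Char).card : Int) := by
  induction c generalizing M d t with
  | nil => simp [pvB_total, Multiset.zero_inter]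
  | cons ch c ih =>
    by_cases hm : ch ∈ M
    · have hpos : d.getD ch 0 > 0 := by
        rw [hd ch]
        exact_mod_cast Multiset.count_pos.2 hm
      rw [pvB_total, if_pos hpos]
      have hd' : ∀ x, (d.insert ch (d.getD ch 0 - 1)).getD x 0 = ((M.erase ch).count x : Int) := by
        intro x
        rw [PySem.Dict.getD_insert]
        by_cases hx : x = ch
        · subst hx
          rw [if_pos rfl, hd x, Multiset.count_erase_self]
          have := Multiset.count_pos.2 hm
          push_cast [Nat.cast_sub (by omega : 1 ≤ M.count x)]
          ring
        · rw [if_neg hx, hd x, Multiset.count_erase_of_ne hx]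
      rw [ih (M.erase ch) _ _ hd', ← Multiset.cons_coe,
        Multiset.cons_inter_of_pos _ hm, Multiset.card_cons]
      push_cast; ring
    · have hz : ¬ d.getD ch 0 > 0 := by
        rw [hd ch, Multiset.count_eq_zero.2 hm]; simp
      rw [pvB_total, if_neg hz, ih M d _ hd, ← Multiset.cons_coe,
        Multiset.cons_inter_of_neg _ hm]

theorem pv_add_inter_add (s t m : Multiset Char) : (s + m) ∩ (t + m) = s ∩ t + m := by
  ext a
  simp only [Multiset.count_inter, Multiset.count_add]
  omega

-- ===== VERDICT (by name: the statement is the Claim_ definition above) =====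
theorem guess_consistent_spec : Claim_equal_guess_consistent := by
  intro number code correct misplaced _ hpre
  unfold Spec_guess_consistent guess_consistent guess_consistent_alt
  obtain ⟨m, hn, hc, hk⟩ := pvA_loop1_decomp number.toList code.toList hpre
  have hcnt : ∀ ch, (number.toList.foldl (fun d ch => d.insert ch (d.getD ch 0 + 1)) PySem.Dict.empty).getD ch 0 = ((number.toList : Multiset Char).count ch : Int) := by
    intro ch
    rw [PySem.Dict.foldl_insert_getD_add_one_eq_counter, PySem.Dict.getD_counter]
    simp
  simp only [pvA_loop2_eq, pvB_correct_eq, pvB_total_eq code.toList (number.toList : Multiset Char) _ 0 hcnt]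
  rw [Multiset.inter_comm, hn, hc, pv_add_inter_add, hk]
  simp only [Multiset.card_add]
  push_cast
  ring_nf
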